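-- pv_equiv track=rewrite | github.com/matansol/minigrid_custom | dpu_clf.py | check_path_through_lava
-- ===== SOURCE A (Python) =====
-- def check_path_through_lava(pos1, pos2, lava_cells):
--     """Check if a straight-line path between two points goes through lava."""
--     x1, y1 = pos1
--     x2, y2 = pos2
--
--     # Simple check: see if any lava cell is on the straight line path
--     dx = abs(x2 - x1)
--     dy = abs(y2 - y1)
--
--     if dx == 0:  # Vertical line
--         for y in range(min(y1, y2), max(y1, y2) + 1):
--             if (x1, y) in lava_cells:
--                 return True
--     elif dy == 0:  # Horizontal line
--         for x in range(min(x1, x2), max(x1, x2) + 1):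
--             if (x, y1) in lava_cells:
--                 return True
--
--     return False
-- ===== SOURCE B (Python) =====
-- def check_path_through_lava(pos1, pos2, lava_cells):
--     """Check if a straight-line path between two points goes through lava."""
--     x1, y1 = pos1
--     x2, y2 = pos2
--     if x1 == x2:  # Vertical line
--         lo, hi = min(y1, y2), max(y1, y2)
--         return any(cx == x1 and lo <= cy <= hi for cx, cy in lava_cells)
--     if y1 == y2:  # Horizontal line
--         lo, hi = min(x1, x2), max(x1, x2)
--         return any(cy == y1 and lo <= cx <= hi for cx, cy in lava_cells)
--     return False
-- ===== Notes on version B (the rewrite author's own statement) =====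
-- stated objective: faster
-- what changed: Instead of enumerating every cell on the segment and testing membership in lava_cells (O(length * |lava|)), B scans lava_cells once and tests each cell's fixed coordinate and range bounds (O(|lava|)).
import Mathlib
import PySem

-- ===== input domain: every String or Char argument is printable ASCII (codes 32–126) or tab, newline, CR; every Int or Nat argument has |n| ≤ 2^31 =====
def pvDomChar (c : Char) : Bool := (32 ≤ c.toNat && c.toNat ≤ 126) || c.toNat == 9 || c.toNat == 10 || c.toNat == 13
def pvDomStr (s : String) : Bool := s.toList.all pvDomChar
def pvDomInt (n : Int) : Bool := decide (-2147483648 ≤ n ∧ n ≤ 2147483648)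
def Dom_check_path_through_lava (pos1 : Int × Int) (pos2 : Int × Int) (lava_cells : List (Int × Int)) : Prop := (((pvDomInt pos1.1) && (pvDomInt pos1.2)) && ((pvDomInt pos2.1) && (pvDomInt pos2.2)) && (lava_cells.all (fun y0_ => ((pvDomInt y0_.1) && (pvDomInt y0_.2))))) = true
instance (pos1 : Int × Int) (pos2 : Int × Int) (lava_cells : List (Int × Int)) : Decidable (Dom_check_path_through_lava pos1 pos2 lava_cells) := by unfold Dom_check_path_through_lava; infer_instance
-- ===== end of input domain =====

-- B scans the lava set once testing fixed coordinate + range bounds instead of enumerating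
-- every cell of the segment and doing a membership scan per cell (objective: faster).

-- ===== PORT A =====
def check_path_through_lava (pos1 : Int × Int) (pos2 : Int × Int) (lava_cells : List (Int × Int)) : Bool :=
  let x1 := pos1.1; let y1 := pos1.2
  let x2 := pos2.1; let y2 := pos2.2
  let dx := |x2 - x1|
  let dy := |y2 - y1|
  if dx = 0 then
    (PySem.List.pyRange (min y1 y2) (max y1 y2 + 1) 1).any (fun y => lava_cells.contains (x1, y))
  else if dy = 0 then
    (PySem.List.pyRange (min x1 x2) (max x1 x2 + 1) 1).any (fun x => lava_cells.contains (x, y1))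
  else
    false

-- ===== PORT B =====
def check_path_through_lava_alt (pos1 : Int × Int) (pos2 : Int × Int) (lava_cells : List (Int × Int)) : Bool :=
  let x1 := pos1.1; let y1 := pos1.2
  let x2 := pos2.1; let y2 := pos2.2
  if x1 = x2 then
    let lo := min y1 y2; let hi := max y1 y2
    lava_cells.any (fun c => c.1 == x1 && decide (lo ≤ c.2) && decide (c.2 ≤ hi))
  else if y1 = y2 then
    let lo := min x1 x2; let hi := max x1 x2
    lava_cells.any (fun c => c.2 == y1 && decide (lo ≤ c.1) && decide (c.1 ≤ hi))
  else
    false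

-- ===== PRECONDITION & SPEC =====
def Spec_check_path_through_lava (pos1 : Int × Int) (pos2 : Int × Int) (lava_cells : List (Int × Int)) (out : Bool) : Prop := out = check_path_through_lava_alt pos1 pos2 lava_cells
instance (pos1 : Int × Int) (pos2 : Int × Int) (lava_cells : List (Int × Int)) (out : Bool) : Decidable (Spec_check_path_through_lava pos1 pos2 lava_cells out) := by unfold Spec_check_path_through_lava; infer_instance

-- ===== CLAIM (what is proved, stated in full; the proofs are below) =====
def Claim_equal_check_path_through_lava : Prop := ∀ (pos1 : Int × Int) (pos2 : Int × Int) (lava_cells : List (Int × Int)), Dom_check_path_through_lava pos1 pos2 lava_cells → Spec_check_path_through_lava pos1 pos2 lava_cells (check_path_through_lava pos1 pos2 lava_cells)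

-- ===== LEMMAS AND PROOFS =====

lemma any_range_fst (a b x1 : Int) (xs : List (Int × Int)) :
    ((PySem.List.pyRange a (b + 1) 1).any (fun y => xs.contains (x1, y))) =
    xs.any (fun c => c.1 == x1 && decide (a ≤ c.2) && decide (c.2 ≤ b)) := by
  rw [Bool.eq_iff_iff]
  simp only [List.any_eq_true, PySem.List.mem_pyRange_one, List.contains_iff_mem,
    Bool.and_eq_true, beq_iff_eq, decide_eq_true_eq]
  constructor
  · rintro ⟨y, ⟨h1, h2⟩, hmem⟩
    exact ⟨(x1, y), hmem, ⟨rfl, h1⟩, by omega⟩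
  · rintro ⟨⟨cx, cy⟩, hmem, ⟨h1, h2⟩, h3⟩
    exact ⟨cy, ⟨h2, by omega⟩, h1 ▸ hmem⟩

lemma any_range_snd (a b y1 : Int) (xs : List (Int × Int)) :
    ((PySem.List.pyRange a (b + 1) 1).any (fun x => xs.contains (x, y1))) =
    xs.any (fun c => c.2 == y1 && decide (a ≤ c.1) && decide (c.1 ≤ b)) := by
  rw [Bool.eq_iff_iff]
  simp only [List.any_eq_true, PySem.List.mem_pyRange_one, List.contains_iff_mem,
    Bool.and_eq_true, beq_iff_eq, decide_eq_true_eq]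
  constructor
  · rintro ⟨x, ⟨h1, h2⟩, hmem⟩
    exact ⟨(x, y1), hmem, ⟨rfl, h1⟩, by omega⟩
  · rintro ⟨⟨cx, cy⟩, hmem, ⟨h1, h2⟩, h3⟩
    exact ⟨cx, ⟨h2, by omega⟩, h1 ▸ hmem⟩

-- ===== VERDICT (by name: the statement is the Claim_ definition above) =====
theorem check_path_through_lava_spec : Claim_equal_check_path_through_lava := by
  intro ⟨x1, y1⟩ ⟨x2, y2⟩ lava _
  unfold Spec_check_path_through_lava check_path_through_lava check_path_through_lava_alt
  simp only [abs_eq_zero, sub_eq_zero]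
  by_cases h1 : x1 = x2
  · subst h1
    rw [if_pos rfl, if_pos rfl]
    exact any_range_fst _ _ _ _
  · rw [if_neg (fun h => h1 h.symm), if_neg h1]
    by_cases h2 : y1 = y2
    · subst h2
      rw [if_pos rfl, if_pos rfl]
      exact any_range_snd _ _ _ _
    · rw [if_neg (fun h => h2 h.symm), if_neg h2]
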